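-- pv_equiv track=rewrite | github.com/darshanrao/Little-Go-Game | little_go.py | z1_count
-- ===== SOURCE A (Python) =====
-- def z1_count(sub_board_state, player):
--    # Pattern one player surrounded by three oppenents
--    # 0 X
--    # X X
--
--     count = 0
--
--
--     for i in range(2):
--         for j in range(2):
--             if sub_board_state[i][j] == player:
--                 if (sub_board_state[1 - i][j] != player and sub_board_state[i][1 - j] != player and sub_board_state[1 - i][1 - j] != player):
--                     count += 1
--
--     return count
-- ===== SOURCE B (Python) =====
-- def z1_count(sub_board_state, player):
--     # The pattern holds iff exactly one of the four cells belongs to `player`: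
--     # count the player's cells in the 2x2 region, compare with 1.
--     count = ((sub_board_state[0][0] == player) + (sub_board_state[0][1] == player)
--              + (sub_board_state[1][0] == player) + (sub_board_state[1][1] == player))
--     return 1 if count == 1 else 0
-- ===== Notes on version B (the rewrite author's own statement) =====
-- stated objective: simpler
-- what changed: Replaced the per-cell surrounded-by-three-neighbours test (nested index loops with three negated comparisons) by a single aggregate count of the player's cells over the four 2x2 cells followed by one '== 1' comparison.
import Mathlib
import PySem

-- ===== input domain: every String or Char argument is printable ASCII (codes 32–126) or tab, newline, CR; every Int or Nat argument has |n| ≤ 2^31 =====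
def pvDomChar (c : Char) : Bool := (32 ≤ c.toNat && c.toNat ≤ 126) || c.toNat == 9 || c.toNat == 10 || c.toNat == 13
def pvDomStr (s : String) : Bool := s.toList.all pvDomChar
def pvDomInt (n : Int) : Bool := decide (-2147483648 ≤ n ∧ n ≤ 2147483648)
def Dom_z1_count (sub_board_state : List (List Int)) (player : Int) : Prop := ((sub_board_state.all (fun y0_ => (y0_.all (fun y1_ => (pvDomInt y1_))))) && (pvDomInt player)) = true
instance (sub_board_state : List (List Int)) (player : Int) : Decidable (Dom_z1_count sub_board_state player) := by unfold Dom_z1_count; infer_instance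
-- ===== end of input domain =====

-- B replaces A's per-cell surrounded-by-three-opponents test by one aggregate
-- count of the player’s cells among the four named cells, compared with 1 (simpler, same cost).


-- ===== PORT A =====
-- cell lookup sub_board_state[i][j]; Pre_ guarantees both pyGet? hit (no IndexError)
def z1_cell (s : List (List Int)) (i j : Int) : Int :=
  (PySem.List.pyGet? ((PySem.List.pyGet? s i).getD []) j).getD 0

def z1_count (sub_board_state : List (List Int)) (player : Int) : Int :=
  (PySem.List.pyRange 0 2 1).foldl (fun count i =>
    (PySem.List.pyRange 0 2 1).foldl (fun count j =>
      if z1_cell sub_board_state i j = player then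
        if z1_cell sub_board_state (1 - i) j ≠ player ∧
           z1_cell sub_board_state i (1 - j) ≠ player ∧
           z1_cell sub_board_state (1 - i) (1 - j) ≠ player then
          count + 1
        else count
      else count) count) 0

-- ===== PORT B =====
def z1_count_alt (sub_board_state : List (List Int)) (player : Int) : Int :=
  let count : Int :=
    (if z1_cell sub_board_state 0 0 = player then 1 else 0) +
    (if z1_cell sub_board_state 0 1 = player then 1 else 0) +
    (if z1_cell sub_board_state 1 0 = player then 1 else 0) +
    (if z1_cell sub_board_state 1 1 = player then 1 else 0)
  if count = 1 then 1 else 0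

-- ===== PRECONDITION & SPEC =====
-- Pre_ excludes exactly the inputs where A raises IndexError: fewer than 2 rows,
-- or one of the first two rows has fewer than 2 cells.
def Pre_z1_count (sub_board_state : List (List Int)) (player : Int) : Prop :=
  2 ≤ sub_board_state.length ∧
  2 ≤ (sub_board_state.getD 0 []).length ∧
  2 ≤ (sub_board_state.getD 1 []).length
instance (sub_board_state : List (List Int)) (player : Int) : Decidable (Pre_z1_count sub_board_state player) := by unfold Pre_z1_count; infer_instance
def pvWitness_z1_count : List (List Int) × Int := ([[1, 0], [0, 0]], 1)


def Spec_z1_count (sub_board_state : List (List Int)) (player : Int) (out : Int) : Prop := out = z1_count_alt sub_board_state player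
instance (sub_board_state : List (List Int)) (player : Int) (out : Int) : Decidable (Spec_z1_count sub_board_state player out) := by unfold Spec_z1_count; infer_instance

-- ===== CLAIM (what is proved, stated in full; the proofs are below) =====
def Claim_equal_z1_count : Prop := ∀ (sub_board_state : List (List Int)) (player : Int), Dom_z1_count sub_board_state player → Pre_z1_count sub_board_state player → Spec_z1_count sub_board_state player (z1_count sub_board_state player)

-- ===== LEMMAS AND PROOFS =====

theorem z1_range2 : PySem.List.pyRange 0 2 1 = [0, 1] := by decide

theorem z1_get1 {α : Type} (x y : α) (t : List α) :
    PySem.List.pyGet? (x :: y :: t) 1 = some y := by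
  rw [show (1 : Int) = ((1 : Nat) : Int) from rfl, PySem.List.pyGet?_natCast]
  rfl

theorem z1_cell_00 (a b c d : Int) (t0 t1 : List Int) (rest : List (List Int)) :
    z1_cell ((a :: b :: t0) :: (c :: d :: t1) :: rest) 0 0 = a := by
  unfold z1_cell
  rw [PySem.List.pyGet?_zero_cons, Option.getD_some, PySem.List.pyGet?_zero_cons,
    Option.getD_some]

theorem z1_cell_01 (a b c d : Int) (t0 t1 : List Int) (rest : List (List Int)) :
    z1_cell ((a :: b :: t0) :: (c :: d :: t1) :: rest) 0 1 = b := by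
  unfold z1_cell
  rw [PySem.List.pyGet?_zero_cons, Option.getD_some, z1_get1, Option.getD_some]

theorem z1_cell_10 (a b c d : Int) (t0 t1 : List Int) (rest : List (List Int)) :
    z1_cell ((a :: b :: t0) :: (c :: d :: t1) :: rest) 1 0 = c := by
  unfold z1_cell
  rw [z1_get1, Option.getD_some, PySem.List.pyGet?_zero_cons, Option.getD_some]

theorem z1_cell_11 (a b c d : Int) (t0 t1 : List Int) (rest : List (List Int)) :
    z1_cell ((a :: b :: t0) :: (c :: d :: t1) :: rest) 1 1 = d := by
  unfold z1_cell
  rw [z1_get1, Option.getD_some, z1_get1, Option.getD_some]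

-- the core arithmetic fact, with the four cell values abstracted out
theorem z1_key (a b c d player : Int) :
    ((if a = player then
        if c ≠ player ∧ b ≠ player ∧ d ≠ player then (0 : Int) + 1 else 0
      else 0) |>
      (fun k => if b = player then
        if d ≠ player ∧ a ≠ player ∧ c ≠ player then k + 1 else k
      else k) |>
      (fun k => if c = player then
        if a ≠ player ∧ d ≠ player ∧ b ≠ player then k + 1 else k
      else k) |>
      (fun k => if d = player then
        if b ≠ player ∧ c ≠ player ∧ a ≠ player then k + 1 else k
      else k)) =
    (if ((if a = player then (1 : Int) else 0) + (if b = player then 1 else 0) +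
          (if c = player then 1 else 0) + (if d = player then 1 else 0)) = 1
      then 1 else 0) := by
  by_cases ha : a = player <;> by_cases hb : b = player <;>
    by_cases hc : c = player <;> by_cases hd : d = player <;>
    simp [ha, hb, hc, hd]

-- ===== VERDICT (by name: the statement is the Claim_ definition above) =====
theorem z1_count_spec : Claim_equal_z1_count := by
  intro s player _ hpre
  obtain ⟨h1, h2, h3⟩ := hpre
  match s with
  | r0 :: r1 :: rest =>
    match r0, r1 with
    | a :: b :: t0, c :: d :: t1 =>
      show Spec_z1_count _ _ _
      unfold Spec_z1_count z1_count z1_count_alt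
      rw [z1_range2]
      simp only [List.foldl]
      norm_num [z1_cell_00, z1_cell_01, z1_cell_10, z1_cell_11]
      exact z1_key a b c d player
    | a :: b :: t0, [] => simp at h3
    | a :: b :: t0, [c] => simp at h3
    | [], _ => simp at h2
    | [a], _ => simp at h2
  | [] => simp at h1
  | [r] => simp at h1
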